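-- pv_equiv track=rewrite | github.com/eboix/relational-reasoning | experiments/dataset_utils.py | are_templates_equivalent
-- ===== SOURCE A (Python) =====
-- def are_templates_equivalent(t1,t2,wildcard_alphabet):
--     sW = wildcard_alphabet
--     assert(len(t1) == len(t2))
--
--     # Check if wildcard positions match
--     for i in range(len(t1)):
--         if t1[i] in sW:
--             if t2[i] not in sW:
--                 return False
--         elif t2[i] in sW:
--             return False
--         elif not t1[i] == t2[i]:
--             assert(t1[i] not in sW)
--             assert(t2[i] not in sW)
--             return False
--         else:
--             assert(t1[i] not in sW)
--             assert(t2[i] not in sW)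
--
--     # Check if within word relative token equality matches
--     for i in range(len(t1)):
--         for j in range(len(t2)):
--             if t1[i] == t1[j]:
--                 if not t2[i] == t2[j]:
--                     return False
--             if t2[i] == t2[j]:
--                 if not t1[i] == t1[j]:
--                     return False
--     return True
-- ===== SOURCE B (Python) =====
-- def are_templates_equivalent(t1, t2, wildcard_alphabet):
--     # One pass: wildcard mask must agree, non-wildcards must be equal, and the
--     # token correspondence t1[i] <-> t2[i] must be a bijection (two dicts).
--     if len(t1) != len(t2):
--         return False
--     sW = set(wildcard_alphabet)
--     fwd = {}
--     bwd = {}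
--     for a, b in zip(t1, t2):
--         if (a in sW) != (b in sW):
--             return False
--         if a not in sW and a != b:
--             return False
--         if a in fwd:
--             if fwd[a] != b:
--                 return False
--         else:
--             fwd[a] = b
--         if b in bwd:
--             if bwd[b] != a:
--                 return False
--         else:
--             bwd[b] = a
--     return True
-- ===== Notes on version B (the rewrite author's own statement) =====
-- stated objective: faster
-- what changed: Replaced A's quadratic all-pairs equality-pattern comparison by a single pass over the zipped templates that maintains a forward and a backward dictionary encoding a partial bijection between tokens.
import Mathlib
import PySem

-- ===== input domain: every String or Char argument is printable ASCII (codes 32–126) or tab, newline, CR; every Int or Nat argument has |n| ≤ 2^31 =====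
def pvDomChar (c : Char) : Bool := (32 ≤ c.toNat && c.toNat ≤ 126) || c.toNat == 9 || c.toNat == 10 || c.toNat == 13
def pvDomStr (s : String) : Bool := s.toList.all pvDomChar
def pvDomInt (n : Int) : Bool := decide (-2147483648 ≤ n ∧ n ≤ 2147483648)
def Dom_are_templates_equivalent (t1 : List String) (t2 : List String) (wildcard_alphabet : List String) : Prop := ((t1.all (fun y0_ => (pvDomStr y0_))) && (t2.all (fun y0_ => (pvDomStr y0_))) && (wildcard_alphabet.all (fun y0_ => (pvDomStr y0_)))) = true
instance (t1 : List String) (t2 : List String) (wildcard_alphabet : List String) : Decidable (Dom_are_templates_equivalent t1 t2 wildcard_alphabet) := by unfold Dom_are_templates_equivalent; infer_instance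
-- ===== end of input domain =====

-- B replaces A's quadratic all-pairs equality-pattern check by a single pass that
-- maintains a forward and a backward dictionary (a partial bijection between tokens):
-- objective 'faster' (O(n^2) -> O(n)).  A raises AssertionError when the lengths
-- differ (excluded by Pre_); B returns False there.

-- ===== PORT A =====
-- first loop: wildcard positions must match, non-wildcard tokens must be equal
def pvA_loop1 (t1 : List String) (t2 : List String) (sW : List String) : List Nat → Bool
  | [] => true
  | i :: is =>
    if sW.contains (t1.getD i "") then
      (if sW.contains (t2.getD i "") then pvA_loop1 t1 t2 sW is else false)
    else if sW.contains (t2.getD i "") then false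
    else if t1.getD i "" = t2.getD i "" then pvA_loop1 t1 t2 sW is
    else false

-- inner j-loop of A's second (quadratic) check
def pvA_inner (t1 : List String) (t2 : List String) (i : Nat) : List Nat → Bool
  | [] => true
  | j :: js =>
    if t1.getD i "" = t1.getD j "" ∧ ¬ t2.getD i "" = t2.getD j "" then false
    else if t2.getD i "" = t2.getD j "" ∧ ¬ t1.getD i "" = t1.getD j "" then false
    else pvA_inner t1 t2 i js

-- outer i-loop of A's second check
def pvA_loop2 (t1 : List String) (t2 : List String) : List Nat → Bool
  | [] => true
  | i :: is => if pvA_inner t1 t2 i (List.range t2.length) then pvA_loop2 t1 t2 is else false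

def are_templates_equivalent (t1 : List String) (t2 : List String) (wildcard_alphabet : List String) : Bool :=
  if t1.length = t2.length then
    if pvA_loop1 t1 t2 wildcard_alphabet (List.range t1.length) then
      pvA_loop2 t1 t2 (List.range t1.length)
    else false
  else false  -- Python raises AssertionError here; excluded by Pre_

-- ===== PORT B =====
-- one pass over the zipped templates with two dicts (partial bijection)
def pvB_loop (sW : PySem.Set String) (fwd : PySem.Dict String String) (bwd : PySem.Dict String String) : List (String × String) → Bool
  | [] => true
  | (a, b) :: rest =>
    if (PySem.Set.contains sW a) != (PySem.Set.contains sW b) then false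
    else if PySem.Set.contains sW a = false ∧ ¬ a = b then false
    else if PySem.Dict.contains fwd a then
      if ¬ PySem.Dict.getD fwd a "" = b then false
      else if PySem.Dict.contains bwd b then
        if ¬ PySem.Dict.getD bwd b "" = a then false
        else pvB_loop sW fwd bwd rest
      else pvB_loop sW fwd (PySem.Dict.insert bwd b a) rest
    else
      if PySem.Dict.contains bwd b then
        if ¬ PySem.Dict.getD bwd b "" = a then false
        else pvB_loop sW (PySem.Dict.insert fwd a b) bwd rest
      else pvB_loop sW (PySem.Dict.insert fwd a b) (PySem.Dict.insert bwd b a) rest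

def are_templates_equivalent_alt (t1 : List String) (t2 : List String) (wildcard_alphabet : List String) : Bool :=
  if ¬ t1.length = t2.length then false
  else pvB_loop (PySem.Set.ofList wildcard_alphabet) PySem.Dict.empty PySem.Dict.empty (t1.zip t2)

-- ===== PRECONDITION & SPEC =====
-- Pre_ excludes inputs of unequal length, on which A raises AssertionError.
def Pre_are_templates_equivalent (t1 : List String) (t2 : List String) (wildcard_alphabet : List String) : Prop := t1.length = t2.length
instance (t1 : List String) (t2 : List String) (wildcard_alphabet : List String) : Decidable (Pre_are_templates_equivalent t1 t2 wildcard_alphabet) := by unfold Pre_are_templates_equivalent; infer_instance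
def pvWitness_are_templates_equivalent : List String × List String × List String := (["a", "W1"], ["a", "W2"], ["W1", "W2"])

def Spec_are_templates_equivalent (t1 : List String) (t2 : List String) (wildcard_alphabet : List String) (out : Bool) : Prop := out = are_templates_equivalent_alt t1 t2 wildcard_alphabet
instance (t1 : List String) (t2 : List String) (wildcard_alphabet : List String) (out : Bool) : Decidable (Spec_are_templates_equivalent t1 t2 wildcard_alphabet out) := by unfold Spec_are_templates_equivalent; infer_instance

-- ===== CLAIM (what is proved, stated in full; the proofs are below) =====
def Claim_equal_are_templates_equivalent : Prop := ∀ (t1 : List String) (t2 : List String) (wildcard_alphabet : List String), Dom_are_templates_equivalent t1 t2 wildcard_alphabet → Pre_are_templates_equivalent t1 t2 wildcard_alphabet → Spec_are_templates_equivalent t1 t2 wildcard_alphabet (are_templates_equivalent t1 t2 wildcard_alphabet)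

-- ===== LEMMAS AND PROOFS =====

-- per-position wildcard/equality condition (Prop form shared by both sides)
def pvPairOK (w : List String) (p : String × String) : Prop :=
  (p.1 ∈ w ↔ p.2 ∈ w) ∧ (p.1 ∉ w → p.1 = p.2)

-- the equality pattern of the two sequences agrees on a list of pairs
def pvGood (ps : List (String × String)) : Prop :=
  ∀ p ∈ ps, ∀ q ∈ ps, (p.1 = q.1 ↔ p.2 = q.2)

theorem pvGood_congr (l l' : List (String × String)) (h : ∀ x, x ∈ l ↔ x ∈ l') :
    pvGood l ↔ pvGood l' := by
  unfold pvGood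
  constructor <;> intro hg p hp q hq
  · exact hg p ((h p).2 hp) q ((h q).2 hq)
  · exact hg p ((h p).1 hp) q ((h q).1 hq)

theorem pvA_loop1_iff (t1 t2 sW : List String) (is : List Nat) :
    pvA_loop1 t1 t2 sW is = true ↔ ∀ i ∈ is, pvPairOK sW (t1.getD i "", t2.getD i "") := by
  induction is with
  | nil => simp [pvA_loop1]
  | cons i is ih =>
    simp only [pvA_loop1, List.mem_cons]
    split_ifs with h1 h2 h3 h4 <;>
      simp_all [List.contains_iff_mem, pvPairOK] <;> tauto

theorem pvA_inner_iff (t1 t2 : List String) (i : Nat) (js : List Nat) :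
    pvA_inner t1 t2 i js = true ↔
      ∀ j ∈ js, (t1.getD i "" = t1.getD j "" ↔ t2.getD i "" = t2.getD j "") := by
  induction js with
  | nil => simp [pvA_inner]
  | cons j js ih =>
    simp only [pvA_inner, List.mem_cons]
    split_ifs with h1 h2 <;> simp_all <;> tauto

theorem pvA_loop2_iff (t1 t2 : List String) (is : List Nat) :
    pvA_loop2 t1 t2 is = true ↔ ∀ i ∈ is, pvA_inner t1 t2 i (List.range t2.length) = true := by
  induction is with
  | nil => simp [pvA_loop2]
  | cons i is ih =>
    simp only [pvA_loop2, List.mem_cons]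
    split_ifs with h1 <;> simp_all

-- A = true iff Mask ∧ Good on the zipped pairs (under equal lengths)
theorem pvA_char (t1 t2 w : List String) (hlen : t1.length = t2.length) :
    are_templates_equivalent t1 t2 w = true ↔
      (∀ p ∈ t1.zip t2, pvPairOK w p) ∧ pvGood (t1.zip t2) := by
  have hmem : ∀ p, p ∈ t1.zip t2 ↔ ∃ i, ∃ h : i < t1.length, t1[i] = p.1 ∧ t2[i] = p.2 := by
    intro p
    rw [List.mem_iff_getElem]
    constructor
    · rintro ⟨i, hi, hp⟩
      rw [List.length_zip, hlen, Nat.min_self] at hi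
      refine ⟨i, by omega, ?_, ?_⟩ <;> rw [← hp] <;> simp [List.getElem_zip]
    · rintro ⟨i, hi, h1, h2⟩
      refine ⟨i, by simp only [List.length_zip]; omega, ?_⟩
      simp [List.getElem_zip, h1, h2]
  have hg1 : ∀ i, (hi : i < t1.length) → t1.getD i "" = t1[i] := by
    intro i hi; rw [List.getD_eq_getElem _ _ hi]
  have hg2 : ∀ i, (hi : i < t1.length) → t2.getD i "" = t2[i]'(by omega) := by
    intro i hi; rw [List.getD_eq_getElem _ _ (by omega)]
  unfold are_templates_equivalent
  rw [if_pos hlen]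
  constructor
  · intro h
    split_ifs at h with h1
    · rw [pvA_loop2_iff] at h
      rw [pvA_loop1_iff] at h1
      constructor
      · intro p hp
        obtain ⟨i, hi, e1, e2⟩ := (hmem p).1 hp
        have := h1 i (by simpa [List.mem_range] using hi)
        rwa [hg1 i hi, hg2 i hi, e1, e2] at this
      · intro p hp q hq
        obtain ⟨i, hi, e1, e2⟩ := (hmem p).1 hp
        obtain ⟨j, hj, f1, f2⟩ := (hmem q).1 hq
        have := (pvA_inner_iff t1 t2 i (List.range t2.length)).1
          (h i (by simpa [List.mem_range] using hi)) j
          (by simp only [List.mem_range]; omega)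
        rwa [hg1 i hi, hg2 i hi, hg1 j hj, hg2 j hj, e1, e2, f1, f2] at this
  · rintro ⟨hmask, hgood⟩
    have h1 : pvA_loop1 t1 t2 w (List.range t1.length) = true := by
      rw [pvA_loop1_iff]
      intro i hi
      rw [List.mem_range] at hi
      rw [hg1 i hi, hg2 i hi]
      have hmm : ((t1[i]'hi, t2[i]'(by omega)) : String × String) ∈ t1.zip t2 :=
        (hmem _).2 ⟨i, hi, rfl, rfl⟩
      exact hmask _ hmm
    rw [if_pos h1, pvA_loop2_iff]
    intro i hi
    rw [List.mem_range] at hi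
    rw [pvA_inner_iff]
    intro j hj
    rw [List.mem_range, ← hlen] at hj
    rw [hg1 i hi, hg2 i hi, hg1 j hj, hg2 j hj]
    have hmi : ((t1[i]'hi, t2[i]'(by omega)) : String × String) ∈ t1.zip t2 :=
      (hmem _).2 ⟨i, hi, rfl, rfl⟩
    have hmj : ((t1[j]'hj, t2[j]'(by omega)) : String × String) ∈ t1.zip t2 :=
      (hmem _).2 ⟨j, hj, rfl, rfl⟩
    exact hgood _ hmi _ hmj

-- B-side per-pair boolean tests equal pvPairOK
theorem pvPairOK_set (w : List String) (a b : String) :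
    (¬ ((PySem.Set.contains (PySem.Set.ofList w) a) != (PySem.Set.contains (PySem.Set.ofList w) b)) = true ∧
      ¬ (PySem.Set.contains (PySem.Set.ofList w) a = false ∧ ¬ a = b)) ↔ pvPairOK w (a, b) := by
  simp only [pvPairOK]
  by_cases h1 : a ∈ w <;> by_cases h2 : b ∈ w <;>
    simp [PySem.Set.contains_iff, PySem.Set.mem_ofList, h1, h2] <;> tauto

-- invariant characterisation of B's single pass
theorem pvB_loop_iff (w : List String) (rest : List (String × String)) :
    ∀ (done : List (String × String)) (fwd bwd : PySem.Dict String String),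
    (∀ a b, PySem.Dict.get? fwd a = some b ↔ (a, b) ∈ done) →
    (∀ a b, PySem.Dict.get? bwd b = some a ↔ (a, b) ∈ done) →
    pvGood done →
    (pvB_loop (PySem.Set.ofList w) fwd bwd rest = true ↔
      (∀ p ∈ rest, pvPairOK w p) ∧ pvGood (done ++ rest)) := by
  induction rest with
  | nil =>
    intro done fwd bwd hf hb hg
    simpa [pvB_loop] using hg
  | cons p rest ih =>
    rintro done fwd bwd hf hb hg
    obtain ⟨a, b⟩ := p
    rw [pvB_loop]
    by_cases hok : pvPairOK w (a, b)
    case neg =>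
      -- one of the two mask tests fires; both sides are false
      have hfire : ((PySem.Set.contains (PySem.Set.ofList w) a) != (PySem.Set.contains (PySem.Set.ofList w) b)) = true ∨
          (PySem.Set.contains (PySem.Set.ofList w) a = false ∧ ¬ a = b) := by
        by_contra hc
        rw [not_or] at hc
        exact hok ((pvPairOK_set w a b).1 ⟨hc.1, hc.2⟩)
      have hfalse : ¬ ((∀ p ∈ (a, b) :: rest, pvPairOK w p) ∧ pvGood (done ++ (a, b) :: rest)) := by
        rintro ⟨hm, -⟩; exact hok (hm _ (by simp))
      rcases hfire with h | h
      · rw [if_pos h]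
        simp only [Bool.false_eq_true, false_iff]
        exact hfalse
      · by_cases hb1 : ((PySem.Set.contains (PySem.Set.ofList w) a) != (PySem.Set.contains (PySem.Set.ofList w) b)) = true
        · rw [if_pos hb1]
          simp only [Bool.false_eq_true, false_iff]
          exact hfalse
        · rw [if_neg hb1, if_pos h]
          simp only [Bool.false_eq_true, false_iff]
          exact hfalse
    case pos =>
      have hset := (pvPairOK_set w a b).2 hok
      rw [if_neg hset.1, if_neg hset.2]
      have hrhs : ((∀ p ∈ (a, b) :: rest, pvPairOK w p) ∧ pvGood (done ++ (a, b) :: rest)) ↔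
          ((∀ p ∈ rest, pvPairOK w p) ∧ pvGood (done ++ (a, b) :: rest)) := by
        constructor
        · rintro ⟨hm, hgood⟩
          exact ⟨fun p hp => hm p (by simp [hp]), hgood⟩
        · rintro ⟨hm, hgood⟩
          refine ⟨fun p hp => ?_, hgood⟩
          rcases List.mem_cons.1 hp with h | h
          · subst h; exact hok
          · exact hm p h
      rcases hfa : PySem.Dict.get? fwd a with _ | b'
      case some =>
        have hca : PySem.Dict.contains fwd a = true := by
          rw [PySem.Dict.contains_eq_isSome_get?, hfa]; rfl
        have hga : PySem.Dict.getD fwd a "" = b' := by rw [PySem.Dict.getD_eq_get?_getD, hfa]; rfl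
        rw [if_pos hca, hga]
        have hdone : (a, b') ∈ done := (hf a b').1 hfa
        by_cases hbb : b' = b
        case neg =>
          rw [if_pos hbb]
          simp only [Bool.false_eq_true, false_iff]
          rintro ⟨-, hgood⟩
          exact hbb ((hgood (a, b') (by simp [hdone]) (a, b) (by simp)).1 rfl)
        case pos =>
          subst hbb
          rw [if_neg (by simp)]
          have hba : PySem.Dict.get? bwd b' = some a := (hb a b').2 hdone
          have hcb : PySem.Dict.contains bwd b' = true := by
            rw [PySem.Dict.contains_eq_isSome_get?, hba]; rfl
          have hgb : PySem.Dict.getD bwd b' "" = a := by rw [PySem.Dict.getD_eq_get?_getD, hba]; rfl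
          rw [if_pos hcb, hgb, if_neg (by simp)]
          rw [ih done fwd bwd hf hb hg]
          have hmemx : ∀ x, x ∈ done ++ rest ↔ x ∈ done ++ (a, b') :: rest := by
            -- (a, b') is already in done, so re-adding it changes nothing
            intro x; simp only [List.mem_append, List.mem_cons]
            constructor
            · tauto
            · rintro (h | h | h)
              · tauto
              · subst h; exact Or.inl hdone
              · tauto
          rw [hrhs, ← pvGood_congr _ _ hmemx]
      case none =>
        have hca : PySem.Dict.contains fwd a = false := by
          rw [PySem.Dict.contains_eq_isSome_get?, hfa]; rfl
        rw [if_neg (by simp [hca])]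
        have hfresh1 : ∀ y, (a, y) ∉ done := fun y hy =>
          Option.some_ne_none y (by rw [← hfa]; exact ((hf a y).2 hy).symm)
        rcases hbb : PySem.Dict.get? bwd b with _ | a'
        case some =>
          have hcb : PySem.Dict.contains bwd b = true := by
            rw [PySem.Dict.contains_eq_isSome_get?, hbb]; rfl
          have hgb : PySem.Dict.getD bwd b "" = a' := by rw [PySem.Dict.getD_eq_get?_getD, hbb]; rfl
          have hdone : (a', b) ∈ done := (hb a' b).1 hbb
          have hne : ¬ a' = a := fun h => hfresh1 b (h ▸ hdone)
          rw [if_pos hcb, hgb, if_pos hne]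
          simp only [Bool.false_eq_true, false_iff]
          rintro ⟨-, hgood⟩
          exact hne ((hgood (a', b) (by simp [hdone]) (a, b) (by simp)).2 rfl)
        case none =>
          have hcb : PySem.Dict.contains bwd b = false := by
            rw [PySem.Dict.contains_eq_isSome_get?, hbb]; rfl
          rw [if_neg (by simp [hcb])]
          have hfresh2 : ∀ x, (x, b) ∉ done := fun x hx =>
            Option.some_ne_none x (by rw [← hbb]; exact ((hb x b).2 hx).symm)
          have hf' : ∀ x y, PySem.Dict.get? (PySem.Dict.insert fwd a b) x = some y ↔ (x, y) ∈ done ++ [(a, b)] := by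
            intro x y
            rw [PySem.Dict.get?_insert]
            by_cases hx : x = a
            · subst hx
              simp only [if_pos rfl, List.mem_append, List.mem_cons]
              constructor
              · rintro h; simp_all
              · rintro (h | h)
                · exact (hfresh1 y h).elim
                · simp_all
            · rw [if_neg hx, hf x y]
              simp only [List.mem_append, List.mem_cons]
              constructor
              · tauto
              · rintro (h | h | h)
                · exact h
                · simp_all
                · simp at h
          have hb' : ∀ x y, PySem.Dict.get? (PySem.Dict.insert bwd b a) y = some x ↔ (x, y) ∈ done ++ [(a, b)] := by
            intro x y
            rw [PySem.Dict.get?_insert]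
            by_cases hy : y = b
            · subst hy
              simp only [if_pos rfl, List.mem_append, List.mem_cons]
              constructor
              · rintro h; simp_all
              · rintro (h | h)
                · exact (hfresh2 x h).elim
                · simp_all
            · rw [if_neg hy, hb x y]
              simp only [List.mem_append, List.mem_cons]
              constructor
              · tauto
              · rintro (h | h | h)
                · exact h
                · simp_all
                · simp at h
          have hg' : pvGood (done ++ [(a, b)]) := by
            rintro ⟨p1, p2⟩ hp ⟨q1, q2⟩ hq
            simp only [List.mem_append, List.mem_singleton, Prod.mk.injEq] at hp hq ⊢
            rcases hp with hp | ⟨hp1, hp2⟩ <;> rcases hq with hq | ⟨hq1, hq2⟩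
            · exact hg _ hp _ hq
            · subst hq1; subst hq2
              constructor
              · intro h; subst h; exact absurd hp (hfresh1 p2)
              · intro h; subst h; exact absurd hp (hfresh2 p1)
            · subst hp1; subst hp2
              constructor
              · intro h; exact absurd (h ▸ hq) (hfresh1 q2)
              · intro h; exact absurd (h ▸ hq) (hfresh2 q1)
            · subst hp1; subst hp2; simp [hq1, hq2]
          rw [ih (done ++ [(a, b)]) _ _ hf' hb' hg']
          rw [hrhs, show done ++ (a, b) :: rest = (done ++ [(a, b)]) ++ rest by simp]

-- B = true iff Mask ∧ Good on the zipped pairs (under equal lengths)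
theorem pvB_char (t1 t2 w : List String) (hlen : t1.length = t2.length) :
    are_templates_equivalent_alt t1 t2 w = true ↔
      (∀ p ∈ t1.zip t2, pvPairOK w p) ∧ pvGood (t1.zip t2) := by
  unfold are_templates_equivalent_alt
  rw [if_neg (by exact fun h => h hlen)]
  rw [pvB_loop_iff w (t1.zip t2) [] PySem.Dict.empty PySem.Dict.empty
      (by intro a b; simp [PySem.Dict.get?_empty])
      (by intro a b; simp [PySem.Dict.get?_empty])
      (by intro p hp; simp at hp)]
  simp

-- ===== VERDICT (by name: the statement is the Claim_ definition above) =====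
theorem are_templates_equivalent_spec : Claim_equal_are_templates_equivalent := by
  intro t1 t2 w _ hpre
  unfold Spec_are_templates_equivalent
  have hlen : t1.length = t2.length := hpre
  rw [Bool.eq_iff_iff, pvA_char t1 t2 w hlen, pvB_char t1 t2 w hlen]
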